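-- pv_equiv track=rewrite | github.com/NoelBird/chocochip | sites/codeforce/global_round_19/c/1.py | calc_op
-- ===== SOURCE A (Python) =====
-- def calc_op(l):
--     cnt = 0
--     for i in range(len(l)):
--         if l[i] % 2 == 0:
--             cnt += l[i]//2
--         else:
--             cnt += l[i]//2+1
--     return cnt
-- ===== SOURCE B (Python) =====
-- def calc_op(l):
--     halves = sum(x // 2 for x in l)
--     odds = sum(1 for x in l if x % 2 != 0)
--     return halves + odds
-- ===== Notes on version B (the rewrite author's own statement) =====
-- stated objective: simpler
-- what changed: Replaces the single indexed loop with a branching accumulator by two direct aggregates: the sum of the floor-halves plus the count of odd elements.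
import Mathlib
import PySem

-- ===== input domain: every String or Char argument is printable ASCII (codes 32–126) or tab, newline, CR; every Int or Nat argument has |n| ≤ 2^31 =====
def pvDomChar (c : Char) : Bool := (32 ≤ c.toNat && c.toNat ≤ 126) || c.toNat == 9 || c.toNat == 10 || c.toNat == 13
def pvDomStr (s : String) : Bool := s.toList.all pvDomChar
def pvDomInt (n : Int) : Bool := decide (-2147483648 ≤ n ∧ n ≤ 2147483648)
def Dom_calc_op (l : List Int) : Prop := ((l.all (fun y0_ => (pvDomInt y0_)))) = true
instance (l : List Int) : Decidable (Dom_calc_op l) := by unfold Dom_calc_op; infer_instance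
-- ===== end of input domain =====

-- B computes two direct aggregates (sum of floor-halves + count of odds) instead of A's indexed loop with a branching accumulator.

-- ===== PORT A =====
def calc_op (l : List Int) : Int :=
  (PySem.List.pyRange 0 (l.length : Int) 1).foldl
    (fun cnt i =>
      if PySem.Int.mod (PySem.List.pyGetD l i 0) 2 = 0 then
        cnt + PySem.Int.floordiv (PySem.List.pyGetD l i 0) 2
      else
        cnt + PySem.Int.floordiv (PySem.List.pyGetD l i 0) 2 + 1)
    0

-- ===== PORT B =====
def calc_op_alt (l : List Int) : Int :=
  (l.map (fun x => PySem.Int.floordiv x 2)).sum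
    + ((l.filter (fun x => !(PySem.Int.mod x 2 == 0))).map (fun _ => (1 : Int))).sum

-- ===== PRECONDITION & SPEC =====
def Spec_calc_op (l : List Int) (out : Int) : Prop := out = calc_op_alt l
instance (l : List Int) (out : Int) : Decidable (Spec_calc_op l out) := by unfold Spec_calc_op; infer_instance

-- ===== CLAIM (what is proved, stated in full; the proofs are below) =====
def Claim_equal_calc_op : Prop := ∀ (l : List Int), Dom_calc_op l → Spec_calc_op l (calc_op l)

-- ===== LEMMAS AND PROOFS =====
theorem calc_op_foldl (l : List Int) (init : Int) :
    l.foldl (fun cnt x =>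
      if PySem.Int.mod x 2 = 0 then cnt + PySem.Int.floordiv x 2
      else cnt + PySem.Int.floordiv x 2 + 1) init
    = init + calc_op_alt l := by
  induction l generalizing init with
  | nil => simp [calc_op_alt]
  | cons x xs ih =>
      simp only [List.foldl_cons, calc_op_alt, List.map_cons, List.sum_cons, List.filter_cons]
      have hme : PySem.Int.mod x 2 = x % 2 := PySem.Int.mod_eq_emod_of_pos (by norm_num)
      by_cases h : PySem.Int.mod x 2 = 0
      · have h' : (!(PySem.Int.mod x 2 == 0)) = false := by
          rw [hme] at h; simp [h]
        rw [if_pos h, ih, h', if_neg (by simp)]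
        simp only [calc_op_alt]; ring
      · have h' : (!(PySem.Int.mod x 2 == 0)) = true := by
          rw [hme] at h; simp; omega
        rw [if_neg h, ih, h', if_pos rfl]
        simp only [calc_op_alt, List.map_cons, List.sum_cons]
        ring

-- ===== VERDICT (by name: the statement is the Claim_ definition above) =====
theorem calc_op_spec : Claim_equal_calc_op := by
  intro l _
  unfold Spec_calc_op calc_op
  rw [PySem.List.foldl_pyRange_zero_pyGetD' l 0
    (fun cnt x => if PySem.Int.mod x 2 = 0 then cnt + PySem.Int.floordiv x 2
      else cnt + PySem.Int.floordiv x 2 + 1) 0]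
  rw [calc_op_foldl]
  ring
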